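-- pv_equiv track=rewrite | github.com/xaxion99/wordle | processor.py | count_all_letter_slot
-- ===== SOURCE A (Python) =====
-- def count_all_letter_slot(chars, alphabet):
--     char_count = 0
--     slot = 0
--     array = []
--     s1_array = []
--     s2_array = []
--     s3_array = []
--     s4_array = []
--     s5_array = []
--     for char in alphabet:
--         while slot < 5:
--             for index, i in enumerate(chars):
--                 if i == char:
--                     if index % 5 == slot:
--                         char_count += 1
--             if slot == 0:
--                 s1_array.append(char_count)
--             elif slot == 1:
--                 s2_array.append(char_count)
--             elif slot == 2:
--                 s3_array.append(char_count)
--             elif slot == 3: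
--                 s4_array.append(char_count)
--             elif slot == 4:
--                 s5_array.append(char_count)
--             char_count = 0
--             slot += 1
--         slot = 0
--     array.append(s1_array)
--     array.append(s2_array)
--     array.append(s3_array)
--     array.append(s4_array)
--     array.append(s5_array)
--     return array
-- ===== SOURCE B (Python) =====
-- def count_all_letter_slot(chars, alphabet):
--     # Split the flat char sequence into its 5 column slots in one pass,
--     # then count each alphabet letter within the already-isolated column.
--     columns = [[], [], [], [], []]
--     for index, char in enumerate(chars):
--         columns[index % 5].append(char)
--     return [[column.count(letter) for letter in alphabet] for column in columns]
-- ===== Notes on version B (the rewrite author's own statement) =====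
-- stated objective: faster
-- what changed: B splits the flat grid into its five column lists with one enumerate pass and then counts each alphabet letter inside the isolated column via list.count, instead of A's triple loop that re-scans all of chars once per (letter, slot) pair.
import Mathlib
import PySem

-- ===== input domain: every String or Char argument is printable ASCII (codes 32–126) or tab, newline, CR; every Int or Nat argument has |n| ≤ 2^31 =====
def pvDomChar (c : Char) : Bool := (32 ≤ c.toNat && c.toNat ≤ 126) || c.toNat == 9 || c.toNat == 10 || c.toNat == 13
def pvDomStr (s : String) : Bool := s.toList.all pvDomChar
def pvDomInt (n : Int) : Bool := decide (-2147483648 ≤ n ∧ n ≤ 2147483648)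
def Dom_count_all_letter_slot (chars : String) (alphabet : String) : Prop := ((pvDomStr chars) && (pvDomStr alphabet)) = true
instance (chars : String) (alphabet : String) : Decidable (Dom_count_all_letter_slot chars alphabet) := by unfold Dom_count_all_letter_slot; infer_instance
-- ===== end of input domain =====

-- B (faster, in a timing run) replaces A's triple loop that re-scans all of chars once per
-- (letter, slot) pair by one enumerate pass splitting chars into its five column lists, then
-- counting each alphabet letter inside the isolated column.

-- ===== PORT A =====
-- the innermost 'for index, i in enumerate(chars)' counting loop of A
def pvInnerCount (chars : List Char) (ch : Char) (slot : Int) : Int :=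
  (PySem.List.enumerate chars 0).foldl
    (fun cc p => if p.2 = ch then (if PySem.Int.mod p.1 5 = slot then cc + 1 else cc) else cc) 0

-- A's 'while slot < 5' loop with its if/elif append chain (fuel 5 suffices: slot starts at 0)
def pvAwhile (chars : List Char) (ch : Char) (slot : Int)
    (s1 s2 s3 s4 s5 : List Int) : Nat → List Int × List Int × List Int × List Int × List Int
  | 0 => (s1, s2, s3, s4, s5)
  | fuel + 1 =>
    if slot < 5 then
      let cc := pvInnerCount chars ch slot
      if slot = 0 then pvAwhile chars ch (slot + 1) (s1 ++ [cc]) s2 s3 s4 s5 fuel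
      else if slot = 1 then pvAwhile chars ch (slot + 1) s1 (s2 ++ [cc]) s3 s4 s5 fuel
      else if slot = 2 then pvAwhile chars ch (slot + 1) s1 s2 (s3 ++ [cc]) s4 s5 fuel
      else if slot = 3 then pvAwhile chars ch (slot + 1) s1 s2 s3 (s4 ++ [cc]) s5 fuel
      else if slot = 4 then pvAwhile chars ch (slot + 1) s1 s2 s3 s4 (s5 ++ [cc]) fuel
      else pvAwhile chars ch (slot + 1) s1 s2 s3 s4 s5 fuel
    else (s1, s2, s3, s4, s5)

def count_all_letter_slot (chars : String) (alphabet : String) : List (List Int) :=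
  let st := alphabet.toList.foldl
    (fun (st : List Int × List Int × List Int × List Int × List Int) ch =>
      pvAwhile chars.toList ch 0 st.1 st.2.1 st.2.2.1 st.2.2.2.1 st.2.2.2.2 5)
    ([], [], [], [], [])
  [st.1, st.2.1, st.2.2.1, st.2.2.2.1, st.2.2.2.2]

-- ===== PORT B =====
def count_all_letter_slot_alt (chars : String) (alphabet : String) : List (List Int) :=
  let columns := (PySem.List.enumerate chars.toList 0).foldl
    (fun (cols : List (List Char)) p =>
      PySem.List.pySetD cols (PySem.Int.mod p.1 5)
        ((PySem.List.pyGetD cols (PySem.Int.mod p.1 5) []) ++ [p.2]))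
    [[], [], [], [], []]
  columns.map (fun col => alphabet.toList.map (fun ch => (col.count ch : Int)))

-- ===== PRECONDITION & SPEC =====
def Spec_count_all_letter_slot (chars : String) (alphabet : String) (out : List (List Int)) : Prop := out = count_all_letter_slot_alt chars alphabet
instance (chars : String) (alphabet : String) (out : List (List Int)) : Decidable (Spec_count_all_letter_slot chars alphabet out) := by unfold Spec_count_all_letter_slot; infer_instance

-- ===== CLAIM (what is proved, stated in full; the proofs are below) =====
def Claim_equal_count_all_letter_slot : Prop := ∀ (chars : String) (alphabet : String), Dom_count_all_letter_slot chars alphabet → Spec_count_all_letter_slot chars alphabet (count_all_letter_slot chars alphabet)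

-- ===== LEMMAS AND PROOFS =====

-- the characters of 'chars' (enumerated from n) whose index is ≡ s (mod 5)
def pvSel (chars : List Char) (n s : Int) : List Char :=
  ((PySem.List.enumerate chars n).filter (fun p => PySem.Int.mod p.1 5 == s)).map (·.2)

theorem pvSel_nil (n s : Int) : pvSel [] n s = [] := rfl

theorem pvSel_cons (c : Char) (cs : List Char) (n s : Int) :
    pvSel (c :: cs) n s =
      (if PySem.Int.mod n 5 = s then [c] else []) ++ pvSel cs (n + 1) s := by
  simp [pvSel, PySem.List.enumerate_cons, List.filter_cons]
  split_ifs with h <;> simp_all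

theorem pvInnerCount_eq (chars : List Char) (ch : Char) (s : Int) :
    pvInnerCount chars ch s = ((pvSel chars 0 s).count ch : Int) := by
  have hfun : (fun (cc : Int) (p : Int × Char) =>
      if p.2 = ch then (if PySem.Int.mod p.1 5 = s then cc + 1 else cc) else cc)
      = fun cc p => if (p.2 = ch ∧ PySem.Int.mod p.1 5 = s) then cc + 1 else cc := by
    funext cc p; split_ifs <;> tauto
  unfold pvInnerCount
  rw [hfun, PySem.List.foldl_ite_add_one (fun p : Int × Char => p.2 = ch ∧ PySem.Int.mod p.1 5 = s)]
  simp only [pvSel, List.count, List.countP_map, List.countP_filter, zero_add]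
  congr 1
  apply List.countP_congr
  intro p _
  simp [Function.comp]

theorem pvAwhile_run (chars : List Char) (ch : Char) (s1 s2 s3 s4 s5 : List Int) :
    pvAwhile chars ch 0 s1 s2 s3 s4 s5 5 =
      (s1 ++ [pvInnerCount chars ch 0], s2 ++ [pvInnerCount chars ch 1],
       s3 ++ [pvInnerCount chars ch 2], s4 ++ [pvInnerCount chars ch 3],
       s5 ++ [pvInnerCount chars ch 4]) := by
  norm_num [pvAwhile]

-- A's outer loop over the alphabet appends one count per letter to each slot array
theorem pvAfold (chars : List Char) (l : List Char) (s1 s2 s3 s4 s5 : List Int) :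
    l.foldl
      (fun (st : List Int × List Int × List Int × List Int × List Int) ch =>
        pvAwhile chars ch 0 st.1 st.2.1 st.2.2.1 st.2.2.2.1 st.2.2.2.2 5)
      (s1, s2, s3, s4, s5) =
      (s1 ++ l.map (fun ch => pvInnerCount chars ch 0),
       s2 ++ l.map (fun ch => pvInnerCount chars ch 1),
       s3 ++ l.map (fun ch => pvInnerCount chars ch 2),
       s4 ++ l.map (fun ch => pvInnerCount chars ch 3),
       s5 ++ l.map (fun ch => pvInnerCount chars ch 4)) := by
  induction l generalizing s1 s2 s3 s4 s5 with
  | nil => simp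
  | cons c l ih => rw [List.foldl_cons, pvAwhile_run, ih]; simp

-- B's enumerate pass distributes each char into the column of its index mod 5
theorem pvBfold (cs : List Char) (n : Int) (a0 a1 a2 a3 a4 : List Char) :
    (PySem.List.enumerate cs n).foldl
      (fun (cols : List (List Char)) p =>
        PySem.List.pySetD cols (PySem.Int.mod p.1 5)
          ((PySem.List.pyGetD cols (PySem.Int.mod p.1 5) []) ++ [p.2]))
      [a0, a1, a2, a3, a4] =
      [a0 ++ pvSel cs n 0, a1 ++ pvSel cs n 1, a2 ++ pvSel cs n 2,
       a3 ++ pvSel cs n 3, a4 ++ pvSel cs n 4] := by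
  induction cs generalizing n a0 a1 a2 a3 a4 with
  | nil => simp [PySem.List.enumerate, pvSel_nil]
  | cons c cs ih =>
    rw [PySem.List.enumerate_cons, List.foldl_cons]
    have h0 : (0 : Int) ≤ PySem.Int.mod n 5 := PySem.Int.mod_nonneg n (by norm_num)
    have h5 : PySem.Int.mod n 5 < 5 := PySem.Int.mod_lt n (by norm_num)
    have hm : PySem.Int.mod n 5 = 0 ∨ PySem.Int.mod n 5 = 1 ∨ PySem.Int.mod n 5 = 2 ∨
        PySem.Int.mod n 5 = 3 ∨ PySem.Int.mod n 5 = 4 := by omega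
    rcases hm with h | h | h | h | h <;>
    · simp only [h, pvSel_cons]
      rw [PySem.List.pyGetD_ofNat', PySem.List.pySetD_of_nonneg _ _ (by norm_num)]
      norm_num [List.set, show ((2:Int)).toNat = 2 from rfl, show ((3:Int)).toNat = 3 from rfl, show ((4:Int)).toNat = 4 from rfl] at ih ⊢
      rw [ih]
      simp

-- ===== VERDICT (by name: the statement is the Claim_ definition above) =====
theorem count_all_letter_slot_spec : Claim_equal_count_all_letter_slot := by
  intro chars alphabet _
  unfold Spec_count_all_letter_slot count_all_letter_slot count_all_letter_slot_alt
  rw [pvAfold, pvBfold]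
  simp [pvInnerCount_eq]
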